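-- pv_equiv track=rewrite | github.com/JLJVS/AdventofCode | 2015/Python/day05.py | has_double_pair
-- ===== SOURCE A (Python) =====
-- def has_double_pair(line: str) -> bool:
--     '''
--     Checks if a string contains a pair at least twice without overlapping itself
--     '''
--     pairs = dict()
--     for i, letter in enumerate(line[:-1]):
--         pair = line[i:i+2]
--         if pair in pairs:
--             if i - pairs[pair] > 1:
--                 return True
--         else:
--             pairs[pair] = i
--
--     return False
-- ===== SOURCE B (Python) =====
-- def has_double_pair(line: str) -> bool:
--     '''
--     Checks if a string contains a pair at least twice without overlapping itself
--     '''
--     return any(line[i:i+2] in line[i+2:] for i in range(len(line) - 1))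
-- ===== Notes on version B (the rewrite author's own statement) =====
-- stated objective: idiomatic
-- what changed: Replaced the dict of first pair positions with early return by a direct existential scan: for each position, test whether its two-character pair occurs again in the rest of the string via substring membership.
import Mathlib
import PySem

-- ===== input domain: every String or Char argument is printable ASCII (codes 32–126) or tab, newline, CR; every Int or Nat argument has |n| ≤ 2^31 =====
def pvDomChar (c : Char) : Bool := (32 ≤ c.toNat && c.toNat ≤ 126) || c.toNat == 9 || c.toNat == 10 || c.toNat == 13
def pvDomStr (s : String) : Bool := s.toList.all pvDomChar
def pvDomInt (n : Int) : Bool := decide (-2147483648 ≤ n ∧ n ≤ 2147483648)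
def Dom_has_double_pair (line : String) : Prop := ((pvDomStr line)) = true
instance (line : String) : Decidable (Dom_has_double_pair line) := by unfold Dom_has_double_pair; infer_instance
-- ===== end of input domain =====

-- B replaces A's first-occurrence dict and early return with a direct existential scan
-- ("does this pair occur again in the tail?"); same return value, no speed claim.

-- ===== PORT A =====
def hdpGo (s : List Char) (items : List (Int × Char)) (pairs : PySem.Dict (List Char) Int) : Bool :=
  match items with
  | [] => false
  | (i, _) :: rest =>
    let pair := PySem.List.slice s (some i) (some (i + 2))
    match pairs.get? pair with
    | some j => if i - j > 1 then true else hdpGo s rest pairs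
    | none => hdpGo s rest (pairs.insert pair i)

def has_double_pair (line : String) : Bool :=
  hdpGo line.toList
    (PySem.List.enumerate (PySem.List.slice line.toList none (some (-1))) 0)
    PySem.Dict.empty

-- ===== PORT B =====
def has_double_pair_alt (line : String) : Bool :=
  (PySem.List.pyRange 0 ((line.toList.length : Int) - 1) 1).any (fun i =>
    PySem.Chars.isIn (PySem.List.slice line.toList (some i) (some (i + 2)))
      (PySem.List.slice line.toList (some (i + 2)) none))

-- ===== PRECONDITION & SPEC =====
def Spec_has_double_pair (line : String) (out : Bool) : Prop := out = has_double_pair_alt line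
instance (line : String) (out : Bool) : Decidable (Spec_has_double_pair line out) := by unfold Spec_has_double_pair; infer_instance

-- ===== CLAIM (what is proved, stated in full; the proofs are below) =====
def Claim_equal_has_double_pair : Prop := ∀ (line : String), Dom_has_double_pair line → Spec_has_double_pair line (has_double_pair line)

-- ===== LEMMAS AND PROOFS =====

-- the pair of characters starting at position k
def pvPf (s : List Char) (k : Nat) : List Char := (s.drop k).take 2

-- both programs decide this proposition
def pvQ (s : List Char) : Prop :=
  ∃ k m : Nat, k + 2 ≤ m ∧ m + 1 < s.length ∧ pvPf s m = pvPf s k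

-- invariant: the dict maps each pair to its first occurrence among positions < t
def pvInv (s : List Char) (d : PySem.Dict (List Char) Int) (t : Nat) : Prop :=
  ∀ p v, d.get? p = some v ↔
    ∃ k : Nat, v = (k : Int) ∧ k < t ∧ pvPf s k = p ∧ ∀ m < k, pvPf s m ≠ p

theorem pvSlice_eq_pf (s : List Char) (t : Nat) :
    PySem.List.slice s (some (t : Int)) (some ((t : Int) + 2)) = pvPf s t := by
  have h : ((t : Int) + 2) = ((t + 2 : Nat) : Int) := by push_cast; ring
  rw [h, PySem.List.slice_natCast, pvPf]
  simp

theorem pvLen_pf (s : List Char) (k : Nat) (h : k + 1 < s.length) :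
    (pvPf s k).length = 2 := by
  simp [pvPf]; omega

theorem pvGo_iff (s : List Char) (t : Nat) (d : PySem.Dict (List Char) Int)
    (hinv : pvInv s d t) :
    hdpGo s (PySem.List.enumerate ((s.dropLast).drop t) (t : Int)) d = true ↔
      ∃ m : Nat, t ≤ m ∧ m + 1 < s.length ∧ ∃ k : Nat, k + 2 ≤ m ∧ pvPf s m = pvPf s k := by
  by_cases ht : t < s.dropLast.length
  · -- head step
    have hn : t + 1 < s.length := by simp [List.length_dropLast] at ht; omega
    have hdrop : s.dropLast.drop t = s.dropLast[t] :: s.dropLast.drop (t + 1) :=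
      List.drop_eq_getElem_cons ht
    rw [hdrop, PySem.List.enumerate_cons, hdpGo]
    simp only [pvSlice_eq_pf]
    have hcast : ((t : Int) + 1) = ((t + 1 : Nat) : Int) := by push_cast; ring
    match hg : d.get? (pvPf s t) with
    | some j =>
      obtain ⟨k, rfl, hkt, hpk, hmin⟩ := (hinv _ _).1 hg
      by_cases hgap : (t : Int) - (k : Int) > 1
      · simp only [if_pos hgap]
        constructor
        · intro _
          exact ⟨t, le_refl t, hn, k, by omega, hpk.symm⟩
        · intro _; trivial
      · simp only [if_neg hgap]
        have hk1 : k + 1 = t := by omega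
        rw [hcast, pvGo_iff s (t + 1) d (by
          intro p v
          rw [hinv p v]
          constructor
          · rintro ⟨k', rfl, hk', hp, hm⟩; exact ⟨k', rfl, by omega, hp, hm⟩
          · rintro ⟨k', rfl, hk', hp, hm⟩
            refine ⟨k', rfl, ?_, hp, hm⟩
            by_contra hge
            have hk't : k' = t := by omega
            subst hk't
            exact hm k (by omega) (hpk.trans hp))]
        constructor
        · rintro ⟨m, hm1, hm2, k', hk', hp⟩; exact ⟨m, by omega, hm2, k', hk', hp⟩
        · rintro ⟨m, hm1, hm2, k', hk', hp⟩
          refine ⟨m, ?_, hm2, k', hk', hp⟩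
          by_contra hlt
          have hmt : m = t := by omega
          subst hmt
          exact hmin k' (by omega) hp.symm
    | none =>
      have hnone : ∀ k' < t, pvPf s k' ≠ pvPf s t := by
        intro k' hk' hp
        have hex : ∃ j, pvPf s j = pvPf s t ∧ j < t := ⟨k', hp, hk'⟩
        classical
        have hspec := Nat.find_spec hex
        have hd : d.get? (pvPf s t) = some ((Nat.find hex : Nat) : Int) :=
          (hinv _ _).2 ⟨Nat.find hex, rfl, hspec.2, hspec.1, fun m hm hpm =>
            Nat.find_min hex hm ⟨hpm, Nat.lt_trans hm hspec.2⟩⟩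
        rw [hg] at hd; cases hd
      rw [hcast, pvGo_iff s (t + 1) (d.insert (pvPf s t) (t : Int)) (by
        intro p v
        by_cases hpt : p = pvPf s t
        · subst hpt
          rw [PySem.Dict.get?_insert_self]
          constructor
          · rintro h; cases h
            exact ⟨t, rfl, by omega, rfl, hnone⟩
          · rintro ⟨k', hv, hk', hp, hm⟩
            have : k' = t := by
              by_contra hne
              exact hnone k' (by omega) hp
            subst this; rw [hv]
        · rw [PySem.Dict.get?_insert_of_ne]
          · rw [hinv p v]
            constructor
            · rintro ⟨k', rfl, hk', hp, hm⟩; exact ⟨k', rfl, by omega, hp, hm⟩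
            · rintro ⟨k', rfl, hk', hp, hm⟩
              refine ⟨k', rfl, ?_, hp, hm⟩
              by_contra hge
              have : k' = t := by omega
              subst this; exact hpt hp.symm
          · exact hpt)]
      constructor
      · rintro ⟨m, hm1, hm2, k', hk', hp⟩; exact ⟨m, by omega, hm2, k', hk', hp⟩
      · rintro ⟨m, hm1, hm2, k', hk', hp⟩
        refine ⟨m, ?_, hm2, k', hk', hp⟩
        by_contra hlt
        have : m = t := by omega
        subst this
        exact hnone k' (by omega) hp.symm
  · -- empty tail
    rw [List.drop_eq_nil_of_le (by omega), PySem.List.enumerate_nil, hdpGo]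
    refine iff_of_false (by simp) ?_
    rintro ⟨m, hm1, hm2, _, _, _⟩
    simp [List.length_dropLast] at ht
    omega
termination_by s.dropLast.length - t

theorem pvA_iff (line : String) : has_double_pair line = true ↔ pvQ line.toList := by
  unfold has_double_pair
  rw [PySem.List.slice_to_neg_one]
  have h := pvGo_iff line.toList 0 PySem.Dict.empty (by
    intro p v
    simp [PySem.Dict.get?_empty])
  simp only [List.drop_zero, Nat.cast_zero] at h
  rw [h]
  unfold pvQ
  constructor
  · rintro ⟨m, _, hm2, k, hk, hp⟩; exact ⟨k, m, hk, hm2, hp⟩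
  · rintro ⟨k, m, hk, hm2, hp⟩; exact ⟨m, by omega, hm2, k, hk, hp⟩

theorem pvPrefix_iff (s : List Char) (k m : Nat) (hk : k + 1 < s.length) :
    pvPf s k <+: s.drop m ↔ pvPf s m = pvPf s k := by
  constructor
  · intro h
    have := List.prefix_iff_eq_take.1 h
    rw [pvLen_pf s k hk] at this
    exact this.symm
  · intro h
    rw [← h]
    exact List.take_prefix _ _

theorem pvB_iff (line : String) : has_double_pair_alt line = true ↔ pvQ line.toList := by
  unfold has_double_pair_alt
  set s := line.toList with hs
  rw [List.any_eq_true]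
  constructor
  · rintro ⟨i, hmem, hin⟩
    rw [PySem.List.mem_pyRange_one] at hmem
    obtain ⟨hi0, hin1⟩ := hmem
    obtain ⟨k, rfl⟩ : ∃ k : Nat, i = (k : Int) := ⟨i.toNat, by omega⟩
    have hk : k + 1 < s.length := by omega
    rw [pvSlice_eq_pf] at hin
    have h2 : ((k : Int) + 2) = ((k + 2 : Nat) : Int) := by push_cast; ring
    rw [h2, PySem.List.slice_from_natCast] at hin
    obtain ⟨j, hpre⟩ := (PySem.Chars.exists_prefix_drop_iff_isIn _ _).2 hin
    have hdd : List.drop j (List.drop (k + 2) s) = List.drop (j + (k + 2)) s := by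
      rw [List.drop_drop]; congr 1; omega
    rw [hdd] at hpre
    have hp := (pvPrefix_iff s k (j + (k + 2)) hk).1 hpre
    have hmlen : j + (k + 2) + 1 < s.length := by
      have hl2 := pvLen_pf s k hk
      have := hpre.length_le
      rw [hl2] at this
      simp at this
      omega
    exact ⟨k, j + (k + 2), by omega, hmlen, hp⟩
  · rintro ⟨k, m, hkm, hm1, hp⟩
    have hk : k + 1 < s.length := by omega
    refine ⟨(k : Int), ?_, ?_⟩
    · rw [PySem.List.mem_pyRange_one]; omega
    · rw [pvSlice_eq_pf]
      have h2 : ((k : Int) + 2) = ((k + 2 : Nat) : Int) := by push_cast; ring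
      rw [h2, PySem.List.slice_from_natCast]
      rw [← PySem.Chars.exists_prefix_drop_iff_isIn]
      refine ⟨m - (k + 2), ?_⟩
      have hdd : List.drop (m - (k + 2)) (List.drop (k + 2) s) = List.drop m s := by
        rw [List.drop_drop]; congr 1; omega
      rw [hdd]
      exact (pvPrefix_iff s k m hk).2 hp

-- ===== VERDICT (by name: the statement is the Claim_ definition above) =====
theorem has_double_pair_spec : Claim_equal_has_double_pair := by
  intro line _
  unfold Spec_has_double_pair
  have hA := pvA_iff line
  have hB := pvB_iff line
  by_cases hq : pvQ line.toList
  · rw [hA.2 hq, hB.2 hq]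
  · rw [Bool.eq_false_iff.2 (fun h => hq (hA.1 h)),
      Bool.eq_false_iff.2 (fun h => hq (hB.1 h))]
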